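-- pv_equiv track=rewrite | github.com/Ratio1/edge_node | extensions/serving/model_testing/test_llm_servings.py | compute_test_cases
-- ===== SOURCE A (Python) =====
-- import itertools
--
-- def compute_test_cases(
--     base_test_cases: list[dict],
--     test_cases_options: dict,
-- ):
--   res = []
--   all_option_keys = test_cases_options.keys()
--   sorted_option_keys = sorted(all_option_keys)
--   grid_iterations = itertools.product(
--     *[test_cases_options[key] for key in sorted_option_keys]
--   )
--   total_options = []
--   for grid_iteration in grid_iterations:
--     total_options.append({
--       key: value for key, value in zip(sorted_option_keys, grid_iteration)
--     })
--   # endfor grid iterations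
--   for base_test_case in base_test_cases:
--     for test_case_option in total_options:
--       test_case_config = {
--         **base_test_case,
--         **test_case_option,
--       }
--       res.append(test_case_config)
--     # endfor test case options
--   # endfor base_test_cases
--   return res
-- ===== SOURCE B (Python) =====
-- def compute_test_cases(
--     base_test_cases: list[dict],
--     test_cases_options: dict,
-- ):
--   combos = [{}]
--   for key in sorted(test_cases_options):
--     combos = [{**c, key: v} for c in combos for v in test_cases_options[key]]
--   return [{**b, **c} for b in base_test_cases for c in combos]
-- ===== Notes on version B (the rewrite author's own statement) =====
-- stated objective: simpler
-- what changed: Replaces itertools.product-of-value-tuples followed by zip/dict-comprehension and nested append loops with an accumulator fold that grows the option dicts one key at a time (combos=[{}]; per key, extend every combo with every value) and a single merge comprehension.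
import Mathlib
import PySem

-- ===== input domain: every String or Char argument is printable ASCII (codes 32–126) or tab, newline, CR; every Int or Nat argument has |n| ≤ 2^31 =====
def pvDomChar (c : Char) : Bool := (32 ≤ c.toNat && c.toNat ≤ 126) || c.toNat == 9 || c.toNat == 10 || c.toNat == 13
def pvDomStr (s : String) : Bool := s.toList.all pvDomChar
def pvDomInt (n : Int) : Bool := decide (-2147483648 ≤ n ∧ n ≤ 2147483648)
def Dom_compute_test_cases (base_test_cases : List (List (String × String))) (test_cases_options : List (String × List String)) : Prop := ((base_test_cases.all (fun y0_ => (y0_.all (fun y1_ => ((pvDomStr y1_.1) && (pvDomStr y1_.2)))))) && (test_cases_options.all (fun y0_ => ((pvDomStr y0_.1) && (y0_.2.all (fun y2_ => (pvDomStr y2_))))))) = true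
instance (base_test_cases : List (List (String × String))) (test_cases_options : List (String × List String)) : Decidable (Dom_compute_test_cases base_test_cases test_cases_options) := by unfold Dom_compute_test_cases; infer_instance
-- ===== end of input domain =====

-- B builds the grid of option dicts by an accumulator fold (one key at a time) instead of
-- itertools.product + zip/dict-comprehension, and merges with a single comprehension: simpler.

-- ===== PORT A =====
-- itertools.product(*lists): first list varies slowest (exact transliteration of the library call)
def pvProdA : List (List String) → List (List String)
  | [] => [[]]
  | xs :: rest => xs.flatMap (fun x => (pvProdA rest).map (fun t => x :: t))

def compute_test_cases (base_test_cases : List (List (String × String))) (test_cases_options : List (String × List String)) : List (List (String × String)) :=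
  let optsD := PySem.Dict.ofList test_cases_options
  let sorted_option_keys := PySem.List.sorted optsD.keys (fun k => k) false
  let grid_iterations := pvProdA (sorted_option_keys.map (fun k => optsD.getD k []))
  let total_options := grid_iterations.map
    (fun grid_iteration => PySem.Dict.ofList (sorted_option_keys.zip grid_iteration))
  base_test_cases.foldl
    (fun res base_test_case =>
      total_options.foldl
        (fun res test_case_option =>
          res ++ [((PySem.Dict.ofList base_test_case).update test_case_option.items).items])
        res)
    []

-- ===== PORT B =====
def compute_test_cases_alt (base_test_cases : List (List (String × String))) (test_cases_options : List (String × List String)) : List (List (String × String)) :=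
  let optsD := PySem.Dict.ofList test_cases_options
  let combos := (PySem.List.sorted optsD.keys (fun k => k) false).foldl
    (fun combos key => combos.flatMap (fun c => (optsD.getD key []).map (fun v => c.insert key v)))
    [PySem.Dict.empty]
  base_test_cases.flatMap
    (fun b => combos.map (fun c => ((PySem.Dict.ofList b).update c.items).items))

-- ===== PRECONDITION & SPEC =====
def Spec_compute_test_cases (base_test_cases : List (List (String × String))) (test_cases_options : List (String × List String)) (out : List (List (String × String))) : Prop := out = compute_test_cases_alt base_test_cases test_cases_options
instance (base_test_cases : List (List (String × String))) (test_cases_options : List (String × List String)) (out : List (List (String × String))) : Decidable (Spec_compute_test_cases base_test_cases test_cases_options out) := by unfold Spec_compute_test_cases; infer_instance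

-- ===== CLAIM (what is proved, stated in full; the proofs are below) =====
def Claim_equal_compute_test_cases : Prop := ∀ (base_test_cases : List (List (String × String))) (test_cases_options : List (String × List String)), Dom_compute_test_cases base_test_cases test_cases_options → Spec_compute_test_cases base_test_cases test_cases_options (compute_test_cases base_test_cases test_cases_options)

-- ===== LEMMAS AND PROOFS =====

-- B's key-by-key fold equals: map "insert the zipped pairs" over A's cartesian product.
theorem pv_fold_eq_prod (vals : String → List String) (ks : List String)
    (acc : List (PySem.Dict String String)) :
    ks.foldl (fun cs k => cs.flatMap (fun c => (vals k).map (fun v => c.insert k v))) acc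
      = acc.flatMap (fun c => (pvProdA (ks.map vals)).map (fun combo => c.update (ks.zip combo))) := by
  induction ks generalizing acc with
  | nil =>
      simp [pvProdA, PySem.Dict.update]
  | cons k ks ih =>
      simp only [List.foldl_cons, ih, pvProdA, List.map_cons]
      simp [List.flatMap_assoc, List.flatMap_map, List.map_flatMap, List.map_map,
            Function.comp_def, List.zip_cons_cons, PySem.Dict.update]

-- A's nested append loops equal a flatMap of maps.
theorem pv_inner_append_map {α β γ : Type} (f : α → β → γ) (b : α) (ts : List β)
    (r : List γ) :
    ts.foldl (fun res t => res ++ [f b t]) r = r ++ ts.map (f b) := by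
  induction ts generalizing r with
  | nil => simp
  | cons t ts iht => rw [List.foldl_cons, iht]; simp

theorem pv_foldl_append_map {α β γ : Type} (f : α → β → γ) (bs : List α) (ts : List β)
    (init : List γ) :
    bs.foldl (fun res b => ts.foldl (fun res t => res ++ [f b t]) res) init
      = init ++ bs.flatMap (fun b => ts.map (f b)) := by
  induction bs generalizing init with
  | nil => simp
  | cons b bs ih =>
      rw [List.foldl_cons, pv_inner_append_map, ih]
      simp

-- ===== VERDICT (by name: the statement is the Claim_ definition above) =====
theorem compute_test_cases_spec : Claim_equal_compute_test_cases := by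
  intro base opts _
  show compute_test_cases base opts = compute_test_cases_alt base opts
  unfold compute_test_cases compute_test_cases_alt
  dsimp only
  rw [pv_fold_eq_prod, pv_foldl_append_map]
  simp [PySem.Dict.ofList, List.map_map]
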